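-- pv_equiv track=rewrite | github.com/Nelinger91/Projects | intro2cs/ex10/ex5/ex5.py | perceptron
-- ===== SOURCE A (Python) =====
-- def dot(A, B):
--     n=len(A)
--     sum=0
--     for i in range(0,n):
--         sum+=A[i]*B[i]
--     return sum
--
-- def perceptron(data, labels):
--     m=len(data)
--     n=len(data[0])
--     w=list([0]*n)
--     b=0
--     counter=0
--     iterations=0
--     i=0
--     sign=0
--     while True:
--         if iterations==10**m:
--             return(None,None)
--         dot_product=dot(w,data[i])-b
--         if dot_product>=0:
--             sign=1
--         else:
--             sign=-1
--         if sign!=labels[i]: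
--             counter=0
--             iterations+=1
--             for j in range(0,n):
--                 w[j]=(labels[i]*(data[i][j]))+w[j]
--             b-=labels[i]
--         else:
--             counter+=1
--         if counter==m:
--             return(w,b)
--         i+=1
--         if (i==m):
--             i=0
-- ===== SOURCE B (Python) =====
-- def perceptron(data, labels):
--     # Dual (kernel) perceptron: keep a per-example mistake count and a
--     # precomputed Gram matrix instead of the weight vector; reconstruct w at the end.
--     m = len(data)
--     n = len(data[0])
--     G = [[sum(data[t][j] * data[k][j] for j in range(n)) for k in range(m)]
--          for t in range(m)]
--     alpha = [0] * m
--     b = 0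
--     counter = 0
--     iterations = 0
--     i = 0
--     while True:
--         if iterations == 10 ** m:
--             return (None, None)
--         score = sum(alpha[t] * labels[t] * G[t][i] for t in range(m)) - b
--         sign = 1 if score >= 0 else -1
--         if sign != labels[i]:
--             counter = 0
--             iterations += 1
--             alpha[i] += 1
--             b -= labels[i]
--         else:
--             counter += 1
--         if counter == m:
--             w = [sum(alpha[t] * labels[t] * data[t][j] for t in range(m))
--                  for j in range(n)]
--             return (w, b)
--         i += 1
--         if i == m:
--             i = 0
-- ===== Notes on version B (the rewrite author's own statement) =====
-- stated objective: alternative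
-- what changed: B is the dual (kernel) perceptron: it maintains a per-example mistake-count vector alpha and a Gram matrix precomputed once, scores each point as sum(alpha[t]*labels[t]*G[t][i])-b instead of a dot product with a weight vector, and reconstructs w from alpha only on success.
-- outside the precondition, e.g. on perceptron([], []): A raises IndexError, B raises IndexError; on perceptron([[1]], []): A raises IndexError, B raises IndexError; on perceptron([[1, 1], [2]], [1, -1]): A raises IndexError, B raises IndexError
import Mathlib
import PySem

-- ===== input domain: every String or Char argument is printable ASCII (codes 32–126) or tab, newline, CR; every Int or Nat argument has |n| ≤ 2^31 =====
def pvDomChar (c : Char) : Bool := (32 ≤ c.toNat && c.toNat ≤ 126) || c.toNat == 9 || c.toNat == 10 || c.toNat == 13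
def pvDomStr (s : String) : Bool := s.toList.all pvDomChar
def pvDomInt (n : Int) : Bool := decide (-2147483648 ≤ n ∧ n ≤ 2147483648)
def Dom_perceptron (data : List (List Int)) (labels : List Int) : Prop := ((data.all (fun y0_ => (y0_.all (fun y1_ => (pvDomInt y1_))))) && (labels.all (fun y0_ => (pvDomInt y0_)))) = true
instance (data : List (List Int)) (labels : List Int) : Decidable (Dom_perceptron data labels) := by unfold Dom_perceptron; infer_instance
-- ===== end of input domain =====

-- B replaces A's weight vector by the DUAL (kernel) perceptron: a per-example mistake-count
-- vector plus a precomputed Gram matrix; the weight vector is reconstructed only on success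
-- (objective: alternative algorithm/data structure, same update sequence).

-- ===== PORT A =====

-- helper `dot(A, B)` of A, literally: sum over range(0, len(A))
def pvDotA (A B : List Int) : Int :=
  (PySem.List.pyRange 0 (A.length : Int)).foldl
    (fun s i => s + PySem.List.pyGetD A i 0 * PySem.List.pyGetD B i 0) 0

-- A's `while True` loop; state (w, b, counter, iterations, i); the proof arguments
-- (counter < m, iterations ≤ 10^m) are invariants of A's loop used only for termination.
def pvLoopA (data : List (List Int)) (labels : List Int) (m n : Nat)
    (w : List Int) (b : Int) (counter iterations i : Nat)
    (hc : counter < m) (hit : iterations ≤ 10 ^ m) : Option (List Int) × Option Int :=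
  if hI : iterations = 10 ^ m then (none, none)
  else
    let row := PySem.List.pyGetD data (i : Int) []
    let dot_product := pvDotA w row - b
    let sign : Int := if dot_product ≥ 0 then 1 else -1
    let lab := PySem.List.pyGetD labels (i : Int) 0
    if sign ≠ lab then
      let w' := (List.range n).map
        (fun (j : Nat) => lab * PySem.List.pyGetD row (j : Int) 0 + PySem.List.pyGetD w (j : Int) 0)
      let b' := b - lab
      if 0 = m then (some w', some b')   -- Python's `if counter==m` with counter just reset to 0
      else pvLoopA data labels m n w' b' 0 (iterations + 1)
             (if i + 1 = m then 0 else i + 1) (by omega) (by omega)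
    else
      if hcm : counter + 1 = m then (some w, some b)
      else pvLoopA data labels m n w b (counter + 1) iterations
             (if i + 1 = m then 0 else i + 1) (by omega) hit
termination_by (10 ^ m - iterations, m - counter)
decreasing_by
  · exact Prod.Lex.left _ _ (by omega)
  · exact Prod.Lex.right _ (by omega)

def perceptron (data : List (List Int)) (labels : List Int) : Option (List Int) × Option Int :=
  match data with
  | [] => (none, none)   -- Python raises IndexError here (excluded by Pre_); guard for totality
  | d0 :: rest =>
    pvLoopA (d0 :: rest) labels (d0 :: rest).length d0.length
      (List.replicate d0.length (0 : Int)) 0 0 0 0 (Nat.succ_pos _) (Nat.zero_le _)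

-- ===== PORT B =====

-- B's Gram matrix G[t][k] = sum over j < n of data[t][j]*data[k][j]
def pvGram (data : List (List Int)) (m n : Nat) : List (List Int) :=
  (List.range m).map (fun (t : Nat) => (List.range m).map (fun (k : Nat) =>
    (List.range n).foldl (fun acc (j : Nat) =>
      acc + PySem.List.pyGetD (PySem.List.pyGetD data (t : Int) []) (j : Int) 0 *
            PySem.List.pyGetD (PySem.List.pyGetD data (k : Int) []) (j : Int) 0) 0))

-- B's score: sum(alpha[t]*labels[t]*G[t][i] for t in range(m))
def pvScore (labels : List Int) (G : List (List Int)) (alpha : List Int) (m i : Nat) : Int :=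
  (List.range m).foldl (fun acc (t : Nat) =>
    acc + PySem.List.pyGetD alpha (t : Int) 0 * PySem.List.pyGetD labels (t : Int) 0 *
          PySem.List.pyGetD (PySem.List.pyGetD G (t : Int) []) (i : Int) 0) 0

-- B's final reconstruction: w[j] = sum(alpha[t]*labels[t]*data[t][j] for t in range(m))
def pvWOf (data : List (List Int)) (labels alpha : List Int) (m n : Nat) : List Int :=
  (List.range n).map (fun (j : Nat) =>
    (List.range m).foldl (fun acc (t : Nat) =>
      acc + PySem.List.pyGetD alpha (t : Int) 0 * PySem.List.pyGetD labels (t : Int) 0 *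
            PySem.List.pyGetD (PySem.List.pyGetD data (t : Int) []) (j : Int) 0) 0)

-- B's `while True` loop; state (alpha, b, counter, iterations, i)
def pvLoopB (data : List (List Int)) (labels : List Int) (G : List (List Int)) (m n : Nat)
    (alpha : List Int) (b : Int) (counter iterations i : Nat)
    (hc : counter < m) (hit : iterations ≤ 10 ^ m) : Option (List Int) × Option Int :=
  if hI : iterations = 10 ^ m then (none, none)
  else
    let score := pvScore labels G alpha m i - b
    let sign : Int := if score ≥ 0 then 1 else -1
    let lab := PySem.List.pyGetD labels (i : Int) 0
    if sign ≠ lab then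
      let alpha' := alpha.set i (PySem.List.pyGetD alpha (i : Int) 0 + 1)
      let b' := b - lab
      if 0 = m then (some (pvWOf data labels alpha' m n), some b')
      else pvLoopB data labels G m n alpha' b' 0 (iterations + 1)
             (if i + 1 = m then 0 else i + 1) (by omega) (by omega)
    else
      if hcm : counter + 1 = m then (some (pvWOf data labels alpha m n), some b)
      else pvLoopB data labels G m n alpha b (counter + 1) iterations
             (if i + 1 = m then 0 else i + 1) (by omega) hit
termination_by (10 ^ m - iterations, m - counter)
decreasing_by
  · exact Prod.Lex.left _ _ (by omega)
  · exact Prod.Lex.right _ (by omega)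

def perceptron_alt (data : List (List Int)) (labels : List Int) : Option (List Int) × Option Int :=
  match data with
  | [] => (none, none)   -- Python raises IndexError here (excluded by Pre_); guard for totality
  | d0 :: rest =>
    pvLoopB (d0 :: rest) labels (pvGram (d0 :: rest) (d0 :: rest).length d0.length)
      (d0 :: rest).length d0.length
      (List.replicate (d0 :: rest).length (0 : Int)) 0 0 0 0 (Nat.succ_pos _) (Nat.zero_le _)

-- ===== PRECONDITION & SPEC =====
-- Pre_: exactly where Python A returns: data nonempty, a label for every point, and every
-- row at least as long as the first one (shorter rows raise IndexError in dot / the update).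
def Pre_perceptron (data : List (List Int)) (labels : List Int) : Prop :=
  data ≠ [] ∧ data.length ≤ labels.length ∧ ∀ row ∈ data, (data.headD []).length ≤ row.length
instance (data : List (List Int)) (labels : List Int) : Decidable (Pre_perceptron data labels) := by
  unfold Pre_perceptron; infer_instance

def pvWitness_perceptron : List (List Int) × List Int := ([[1, 1], [-2, 0]], [1, -1])

def Spec_perceptron (data : List (List Int)) (labels : List Int) (out : Option (List Int) × Option Int) : Prop := out = perceptron_alt data labels
instance (data : List (List Int)) (labels : List Int) (out : Option (List Int) × Option Int) : Decidable (Spec_perceptron data labels out) := by unfold Spec_perceptron; infer_instance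

-- ===== CLAIM (what is proved, stated in full; the proofs are below) =====
def Claim_equal_perceptron : Prop := ∀ (data : List (List Int)) (labels : List Int), Dom_perceptron data labels → Pre_perceptron data labels → Spec_perceptron data labels (perceptron data labels)

-- ===== LEMMAS AND PROOFS =====

-- a foldl accumulating sums over range n is a Finset sum
lemma pv_foldl_sum (g : Nat → Int) : ∀ (n : Nat),
    (List.range n).foldl (fun acc j => acc + g j) 0 = ∑ j ∈ Finset.range n, g j := by
  intro n
  induction n with
  | zero => rfl
  | succ n ih => rw [List.range_succ, List.foldl_append, Finset.sum_range_succ, ih]; rfl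

-- element access into the lists built by map over range
lemma pv_getD_map_range (f : Nat → Int) (n j : Nat) (hj : j < n) :
    PySem.List.pyGetD ((List.range n).map f) (j : Int) 0 = f j := by
  rw [PySem.List.pyGetD_natCast]
  rw [List.getD_eq_getElem?_getD]
  simp [hj]

lemma pv_getD_map_range' (f : Nat → List Int) (n j : Nat) (hj : j < n) :
    PySem.List.pyGetD ((List.range n).map f) (j : Int) [] = f j := by
  rw [PySem.List.pyGetD_natCast]
  rw [List.getD_eq_getElem?_getD]
  simp [hj]

-- A's primal score on the reconstructed weights equals B's dual score via the Gram matrix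
lemma pv_score_eq (data : List (List Int)) (labels alpha : List Int) (m n i : Nat) (him : i < m) :
    pvDotA (pvWOf data labels alpha m n) (PySem.List.pyGetD data (i : Int) []) =
      pvScore labels (pvGram data m n) alpha m i := by
  unfold pvDotA pvScore
  have hlen : (pvWOf data labels alpha m n).length = n := by
    unfold pvWOf; simp
  rw [hlen, PySem.List.pyRange_zero_nat, List.foldl_map]
  rw [pv_foldl_sum (fun j => PySem.List.pyGetD (pvWOf data labels alpha m n) (j : Int) 0 *
        PySem.List.pyGetD (PySem.List.pyGetD data (i : Int) []) (j : Int) 0) n]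
  rw [pv_foldl_sum (fun t => PySem.List.pyGetD alpha (t : Int) 0 * PySem.List.pyGetD labels (t : Int) 0 *
        PySem.List.pyGetD (PySem.List.pyGetD (pvGram data m n) (t : Int) []) (i : Int) 0) m]
  have hL : ∀ j ∈ Finset.range n,
      PySem.List.pyGetD (pvWOf data labels alpha m n) (j : Int) 0 *
        PySem.List.pyGetD (PySem.List.pyGetD data (i : Int) []) (j : Int) 0 =
      ∑ t ∈ Finset.range m,
        PySem.List.pyGetD alpha (t : Int) 0 * PySem.List.pyGetD labels (t : Int) 0 *
          PySem.List.pyGetD (PySem.List.pyGetD data (t : Int) []) (j : Int) 0 *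
          PySem.List.pyGetD (PySem.List.pyGetD data (i : Int) []) (j : Int) 0 := by
    intro j hj
    rw [Finset.mem_range] at hj
    unfold pvWOf
    rw [pv_getD_map_range _ n j hj, pv_foldl_sum, Finset.sum_mul]
  rw [Finset.sum_congr rfl hL, Finset.sum_comm]
  apply Finset.sum_congr rfl
  intro t ht
  rw [Finset.mem_range] at ht
  unfold pvGram
  rw [pv_getD_map_range' _ m t ht, pv_getD_map_range _ m i him, pv_foldl_sum, Finset.mul_sum]
  apply Finset.sum_congr rfl
  intro j _
  ring

-- A's in-place weight update equals B's reconstruction from the bumped mistake count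
lemma pv_upd_eq (data : List (List Int)) (labels alpha : List Int) (m n i : Nat)
    (him : i < m) (hlen : alpha.length = m) :
    (List.range n).map (fun (j : Nat) =>
        PySem.List.pyGetD labels (i : Int) 0 *
          PySem.List.pyGetD (PySem.List.pyGetD data (i : Int) []) (j : Int) 0 +
        PySem.List.pyGetD (pvWOf data labels alpha m n) (j : Int) 0) =
      pvWOf data labels (alpha.set i (PySem.List.pyGetD alpha (i : Int) 0 + 1)) m n := by
  unfold pvWOf
  apply List.map_congr_left
  intro j hj
  rw [List.mem_range] at hj
  rw [pv_getD_map_range _ n j hj, pv_foldl_sum, pv_foldl_sum]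
  have hset : ∀ t ∈ Finset.range m,
      PySem.List.pyGetD (alpha.set i (PySem.List.pyGetD alpha (i : Int) 0 + 1)) (t : Int) 0 *
        PySem.List.pyGetD labels (t : Int) 0 *
        PySem.List.pyGetD (PySem.List.pyGetD data (t : Int) []) (j : Int) 0 =
      PySem.List.pyGetD alpha (t : Int) 0 * PySem.List.pyGetD labels (t : Int) 0 *
        PySem.List.pyGetD (PySem.List.pyGetD data (t : Int) []) (j : Int) 0 +
      (if t = i then
        PySem.List.pyGetD labels (i : Int) 0 *
          PySem.List.pyGetD (PySem.List.pyGetD data (i : Int) []) (j : Int) 0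
       else 0) := by
    intro t ht
    rw [Finset.mem_range] at ht
    simp only [PySem.List.pyGetD_natCast, List.getD_eq_getElem?_getD, List.getElem?_set]
    by_cases h : i = t
    · subst h
      rw [if_pos rfl]
      rw [if_pos (by omega : i < alpha.length)]
      rw [if_pos rfl]
      simp only [Option.getD_some]
      ring
    · rw [if_neg h, if_neg (fun e => h e.symm)]
      ring
  rw [Finset.sum_congr rfl hset, Finset.sum_add_distrib, Finset.sum_ite_eq' (Finset.range m) i]
  simp only [Finset.mem_range.mpr him, if_pos]
  ring

-- reconstruction from the all-zero mistake counts is the all-zero weight vector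
lemma pv_wOf_zero (data : List (List Int)) (labels : List Int) (m n : Nat) :
    pvWOf data labels (List.replicate m (0 : Int)) m n = List.replicate n (0 : Int) := by
  unfold pvWOf
  rw [List.map_eq_iff]
  intro j
  by_cases hj : j < n
  · rw [List.getElem?_range hj]
    simp only [Option.map_some]
    rw [pv_foldl_sum]
    rw [List.getElem?_eq_getElem (by simpa using hj)]
    simp only [List.getElem_replicate, Option.some_inj]
    refine (Finset.sum_eq_zero ?_).symm
    intro t ht
    rw [Finset.mem_range] at ht
    rw [PySem.List.pyGetD_natCast, List.getD_eq_getElem?_getD,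
        List.getElem?_replicate_of_lt ht]
    simp
  · rw [List.getElem?_eq_none (by simpa using Nat.le_of_not_lt hj),
        List.getElem?_eq_none (by simpa using Nat.le_of_not_lt hj)]
    rfl

-- the two loops run in lockstep: A's weight state is the reconstruction of B's counts
lemma pv_loopAB (data : List (List Int)) (labels : List Int) (m n : Nat) (hm : 0 < m) :
    ∀ (F : Nat), ∀ (C : Nat), ∀ (alpha : List Int) (b : Int) (counter iterations i : Nat)
      (hlen : alpha.length = m) (him : i < m)
      (hc : counter < m) (hit : iterations ≤ 10 ^ m),
      10 ^ m - iterations ≤ F → m - counter ≤ C →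
      pvLoopA data labels m n (pvWOf data labels alpha m n) b counter iterations i hc hit =
        pvLoopB data labels (pvGram data m n) m n alpha b counter iterations i hc hit := by
  intro F
  induction F with
  | zero =>
    intro C alpha b counter iterations i hlen him hc hit hF hC
    have : iterations = 10 ^ m := by omega
    rw [pvLoopA, pvLoopB, dif_pos this, dif_pos this]
  | succ F ihF =>
    intro C
    induction C with
    | zero => intro alpha b counter iterations i _ _ hc hit hF hC; omega
    | succ C ihC =>
      intro alpha b counter iterations i hlen him hc hit hF hC
      by_cases hEq : iterations = 10 ^ m
      · rw [pvLoopA, pvLoopB, dif_pos hEq, dif_pos hEq]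
      · rw [pvLoopA, pvLoopB, dif_neg hEq, dif_neg hEq]
        simp only [pv_score_eq data labels alpha m n i him]
        by_cases hsign :
            (if pvScore labels (pvGram data m n) alpha m i - b ≥ 0 then (1 : Int) else -1) ≠
              PySem.List.pyGetD labels (i : Int) 0
        · simp only [if_pos hsign, if_neg (by omega : ¬ 0 = m)]
          rw [pv_upd_eq data labels alpha m n i him hlen]
          exact ihF m _ _ 0 (iterations + 1) _ (by rw [List.length_set]; exact hlen)
            (by split_ifs <;> omega) hm (by omega) (by omega) (by omega)
        · simp only [if_neg hsign]
          by_cases hcm : counter + 1 = m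
          · rw [dif_pos hcm, dif_pos hcm]
          · rw [dif_neg hcm, dif_neg hcm]
            exact ihC alpha b (counter + 1) iterations _ hlen (by split_ifs <;> omega)
              (by omega) hit (by omega) (by omega)

-- ===== VERDICT (by name: the statement is the Claim_ definition above) =====
theorem perceptron_spec : Claim_equal_perceptron := by
  intro data labels _ hpre
  unfold Spec_perceptron
  match data with
  | [] => rfl
  | d0 :: rest =>
    have h := pv_loopAB (d0 :: rest) labels (d0 :: rest).length d0.length (Nat.succ_pos _)
      (10 ^ (d0 :: rest).length) ((d0 :: rest).length)
      (List.replicate (d0 :: rest).length (0 : Int)) 0 0 0 0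
      (by simp) (by simp) (Nat.succ_pos _) (Nat.zero_le _) (Nat.sub_le _ _) (Nat.sub_le _ _)
    rw [pv_wOf_zero] at h
    exact h
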